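-- pv_equiv track=rewrite | github.com/ACRLab/snazzy | snazzy_processing/snazzy_processing/slice_img.py | sort_by_grid_pos
-- ===== SOURCE A (Python) =====
-- def sort_by_grid_pos(extremes: list[list[int]], n_cols: int):
--     """Sorts each boundary points list based on their position in the grid.
--
--     Sorts by F-order (column-wise).
--
--     Parameters:
--         extremes (list[list[int]]):
--             List of bbox coordinates
--         n_cols (int):
--             Number of columns to use to order embryos.
--
--     Returns:
--         sorted_bboxes (dict[int, list[int]]):
--             Dict of bbox order to bbox coordinates.
--     """
--     centroids = [
--         ((r0 + r1) // 2, (c0 + c1) // 2, i)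
--         for i, (r0, r1, c0, c1) in enumerate(extremes)
--     ]
--     # determine bin_size from the maximum column value
--     bin_size = (max((c[1] for c in centroids)) // n_cols) + 1
--
--     bins = [[] for _ in range(n_cols)]
--     # add centroids to their respective bins
--     for centroid in centroids:
--         col = centroid[1]
--         bin_idx = col // bin_size
--         bins[bin_idx].append(centroid)
--
--     # filter out possibly empty bins
--     bins = [b for b in bins if len(b) > 0]
--
--     # sort bins by row value
--     for b in bins:
--         b.sort(key=lambda b: b[0])
--
--     # extracts each index
--     indices = [b[2] for bin in bins for b in bin]
--     return {k + 1: extremes[i] for k, i in enumerate(indices)}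
-- ===== SOURCE B (Python) =====
-- def sort_by_grid_pos(extremes: list[list[int]], n_cols: int):
--     """Single stable sort by the composite key (column bin, row) instead of
--     bucketing into per-column bins and sorting each bin."""
--     centroids = [
--         ((r0 + r1) // 2, (c0 + c1) // 2, i)
--         for i, (r0, r1, c0, c1) in enumerate(extremes)
--     ]
--     bin_size = (max(c[1] for c in centroids) // n_cols) + 1
--     ordered = sorted(centroids, key=lambda c: (c[1] // bin_size, c[0]))
--     return {k + 1: extremes[i] for k, (_, _, i) in enumerate(ordered)}
-- ===== Notes on version B (the rewrite author's own statement) =====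
-- stated objective: simpler
-- what changed: Replaces the per-column bucket machinery (allocate n_cols bin lists, append each centroid by bin index, drop empty bins, sort every bin by row, concatenate) with one stable sort of the centroid list by the composite key (column bin, row); Pre_ additionally excludes inputs with a negative centroid column (c0+c1)//2 — outside the image-bbox domain — where A files the box into a bin counted from the grid's right edge via Python's negative list indexing while B orders it before column 0, both orders being defensible on such out-of-range coordinates.
import Mathlib
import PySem

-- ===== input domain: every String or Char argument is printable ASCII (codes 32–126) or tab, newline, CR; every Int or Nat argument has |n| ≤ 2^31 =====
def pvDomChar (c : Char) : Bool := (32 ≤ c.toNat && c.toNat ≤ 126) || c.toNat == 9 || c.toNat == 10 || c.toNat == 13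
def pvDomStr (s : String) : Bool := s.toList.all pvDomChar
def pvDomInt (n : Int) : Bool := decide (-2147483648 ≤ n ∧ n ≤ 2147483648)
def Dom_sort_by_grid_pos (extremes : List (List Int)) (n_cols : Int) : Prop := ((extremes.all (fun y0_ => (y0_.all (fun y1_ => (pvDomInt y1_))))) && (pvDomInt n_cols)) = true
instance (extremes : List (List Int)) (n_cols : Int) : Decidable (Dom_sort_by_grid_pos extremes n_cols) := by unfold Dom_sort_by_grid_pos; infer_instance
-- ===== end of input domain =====

-- B replaces A's per-column bucket lists by one stable sort on the composite key (column bin, row); same cost class, less machinery.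

-- shared by both ports: both Python versions build the same centroid comprehension
-- [( (r0+r1)//2, (c0+c1)//2, i ) for i,(r0,r1,c0,c1) in enumerate(extremes)]
def pvCentroids (extremes : List (List Int)) : List (Int × Int × Int) :=
  (PySem.List.enumerate extremes).map (fun p =>
    match p.2 with
    | [r0, r1, c0, c1] => (PySem.Int.floordiv (r0 + r1) 2, PySem.Int.floordiv (c0 + c1) 2, p.1)
    | _ => (0, 0, 0))   -- a row not of length 4: Python ValueError on unpack, excluded by Pre_

-- ===== PORT A =====
def sort_by_grid_pos (extremes : List (List Int)) (n_cols : Int) : List (Int × List Int) :=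
  let centroids := pvCentroids extremes
  match PySem.List.max? (centroids.map (fun c => c.2.1)) (fun x => x) with
  | none => []          -- max() of an empty sequence: ValueError, excluded by Pre_
  | some m =>
    let bin_size := PySem.Int.floordiv m n_cols + 1   -- n_cols = 0: ZeroDivisionError, excluded by Pre_
    let bins :=
      centroids.foldl (fun bins c =>
        match PySem.List.pyIdx? bins.length (PySem.Int.floordiv c.2.1 bin_size) with
        | some j => bins.set j (bins.getD j [] ++ [c])
        | none => bins)                               -- IndexError, excluded by Pre_
        (List.replicate n_cols.toNat ([] : List (Int × Int × Int)))
    let bins2 := bins.filter (fun b => decide (0 < b.length))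
    let bins3 := bins2.map (fun b => PySem.List.sorted b (fun c => c.1))
    let indices := bins3.flatMap (fun bin => bin.map (fun c => c.2.2))
    (PySem.List.enumerate indices).map (fun p => (p.1 + 1, (PySem.List.pyGet? extremes p.2).getD []))

-- ===== PORT B =====
def sort_by_grid_pos_alt (extremes : List (List Int)) (n_cols : Int) : List (Int × List Int) :=
  let centroids := pvCentroids extremes
  match PySem.List.max? (centroids.map (fun c => c.2.1)) (fun x => x) with
  | none => []          -- max() of an empty sequence: ValueError, excluded by Pre_
  | some m =>
    let bin_size := PySem.Int.floordiv m n_cols + 1   -- n_cols = 0: ZeroDivisionError, excluded by Pre_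
    let ordered := PySem.List.sorted2 centroids
      (fun c => PySem.Int.floordiv c.2.1 bin_size) (fun c => c.1)
    (PySem.List.enumerate ordered).map (fun p => (p.1 + 1, (PySem.List.pyGet? extremes p.2.2.2).getD []))

-- ===== PRECONDITION & SPEC =====
-- closed-form helpers for Pre_/D_ (independent of the ports)
def pvCol (row : List Int) : Int := PySem.Int.floordiv (row.getD 2 0 + row.getD 3 0) 2
-- Pre_ excludes, besides A's crashes (empty list, a row not of length 4, n_cols < 1, a bin index
-- past the left end of the bins list), the inputs where some bbox centroid column (c0+c1)//2 is
-- negative: such coordinates lie outside the function's image-bbox domain, and on them neither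
-- order is the one to specify — A files the box into a bin counted from the grid's right edge
-- (Python's negative list index), B orders it before column 0; both are defensible there.
def Pre_sort_by_grid_pos (extremes : List (List Int)) (n_cols : Int) : Prop :=
  extremes ≠ [] ∧ 1 ≤ n_cols ∧ (∀ row ∈ extremes, row.length = 4) ∧
  ∀ row ∈ extremes, 0 ≤ pvCol row
instance (extremes : List (List Int)) (n_cols : Int) : Decidable (Pre_sort_by_grid_pos extremes n_cols) := by
  unfold Pre_sort_by_grid_pos; infer_instance

def pvWitness_sort_by_grid_pos : List (List Int) × Int := ([[0, 2, 0, 2], [4, 6, 10, 12]], 2)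

def Spec_sort_by_grid_pos (extremes : List (List Int)) (n_cols : Int) (out : List (Int × List Int)) : Prop :=
  out = sort_by_grid_pos_alt extremes n_cols
instance (extremes : List (List Int)) (n_cols : Int) (out : List (Int × List Int)) : Decidable (Spec_sort_by_grid_pos extremes n_cols out) := by
  unfold Spec_sort_by_grid_pos; infer_instance

-- ===== CLAIM (what is proved, stated in full; the proofs are below) =====
def Claim_equal_sort_by_grid_pos : Prop := ∀ (extremes : List (List Int)) (n_cols : Int), Dom_sort_by_grid_pos extremes n_cols → Pre_sort_by_grid_pos extremes n_cols → Spec_sort_by_grid_pos extremes n_cols (sort_by_grid_pos extremes n_cols)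

-- ===== LEMMAS AND PROOFS =====

-- the first maximal column value (what A's max() computes), proof-side only
def pvMaxCol (extremes : List (List Int)) : Int :=
  match extremes.map pvCol with
  | [] => 0
  | x :: t => t.foldl max x

theorem pv_insertBy_append_false {α : Type} (before : α → α → Bool) (x : α) (ys zs : List α)
    (h : ∀ y ∈ ys, before x y = false) :
    PySem.List.insertBy before x (ys ++ zs) = ys ++ PySem.List.insertBy before x zs := by
  induction ys with
  | nil => simp
  | cons y ys ih =>
    rw [List.cons_append, PySem.List.insertBy.eq_2, h y (by simp)]
    simp only [Bool.false_eq_true, if_false, List.cons_append]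
    rw [ih (fun y hy => h y (by simp [hy]))]

theorem pv_insertBy_append_true {α : Type} (before : α → α → Bool) (x : α) (ys zs : List α)
    (h : ∀ z ∈ zs, before x z = true) :
    PySem.List.insertBy before x (ys ++ zs) = PySem.List.insertBy before x ys ++ zs := by
  induction ys with
  | nil =>
    cases zs with
    | nil => simp
    | cons z zs => simp [PySem.List.insertBy.eq_2, h z (by simp), PySem.List.insertBy.eq_1]
  | cons y ys ih =>
    rw [List.cons_append, PySem.List.insertBy.eq_2, PySem.List.insertBy.eq_2]
    by_cases hb : before x y = true
    · simp [hb]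
    · rw [if_neg hb, if_neg hb, ih, List.cons_append]

theorem pv_insertBy_congr {α : Type} (before before' : α → α → Bool) (x : α) (ys : List α)
    (h : ∀ y ∈ ys, before x y = before' x y) :
    PySem.List.insertBy before x ys = PySem.List.insertBy before' x ys := by
  induction ys with
  | nil => rw [PySem.List.insertBy.eq_1, PySem.List.insertBy.eq_1]
  | cons y ys ih =>
    rw [PySem.List.insertBy.eq_2, PySem.List.insertBy.eq_2, h y (by simp),
      ih (fun y hy => h y (by simp [hy]))]

theorem pv_sorted_append_singleton {α : Type} (xs : List α) (x : α) (key : α → Int) :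
    PySem.List.sorted (xs ++ [x]) key =
      PySem.List.insertBy (fun a b => decide (key a < key b)) x (PySem.List.sorted xs key) := by
  rw [PySem.List.sorted_eq_foldl_insertBy, PySem.List.sorted_eq_foldl_insertBy, List.foldl_append]
  rfl

def pvLex {α : Type} (k1 k2 : α → Int) (a b : α) : Bool :=
  decide (k1 a < k1 b) || (!decide (k1 b < k1 a) && decide (k2 a < k2 b))

theorem pv_sorted2_nil {α : Type} (k1 k2 : α → Int) :
    PySem.List.sorted2 ([] : List α) k1 k2 = [] := rfl

theorem pv_sorted2_append_singleton {α : Type} (xs : List α) (x : α) (k1 k2 : α → Int) :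
    PySem.List.sorted2 (xs ++ [x]) k1 k2 =
      PySem.List.insertBy (pvLex k1 k2) x (PySem.List.sorted2 xs k1 k2) := by
  simp only [PySem.List.sorted2, List.foldl_append, List.foldl_cons, List.foldl_nil]
  rfl

-- the heart of the equivalence: concatenating the per-bin row-sorted buckets, in increasing
-- bin order, is the one stable sort by the composite key (bin, row)
theorem pv_flatten_buckets {α : Type} (bin row : α → Int) (J : List Int)
    (hpw : J.Pairwise (· < ·)) :
    ∀ cs : List α, (∀ c ∈ cs, bin c ∈ J) →
      ((J.map (fun j => PySem.List.sorted (cs.filter (fun c => decide (bin c = j))) (fun c => row c))).flatten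
        = PySem.List.sorted2 cs bin row) := by
  intro cs
  induction cs using List.reverseRecOn with
  | nil =>
    intro _
    have hs : PySem.List.sorted ([] : List α) (fun c => row c) = [] := rfl
    simp [pv_sorted2_nil, hs]
  | append_singleton cs x ih =>
    intro hmem
    have hmem' : ∀ c ∈ cs, bin c ∈ J := fun c hc => hmem c (by simp [hc])
    have hx : bin x ∈ J := hmem x (by simp)
    obtain ⟨J1, J2, hJ⟩ := List.append_of_mem hx
    subst hJ
    have h12 := List.pairwise_append.mp hpw
    have hJ1lt : ∀ j ∈ J1, j < bin x := fun j hj => h12.2.2 j hj (bin x) (by simp)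
    have hJ2gt : ∀ j ∈ J2, bin x < j := (List.pairwise_cons.mp h12.2.1).1
    rw [pv_sorted2_append_singleton, ← ih hmem']
    -- bucket shapes over cs ++ [x]
    have hFne : ∀ j : Int, bin x ≠ j →
        (cs ++ [x]).filter (fun c => decide (bin c = j)) = cs.filter (fun c => decide (bin c = j)) := by
      intro j hne
      rw [List.filter_append]
      simp [List.filter, hne]
    have hFx : (cs ++ [x]).filter (fun c => decide (bin c = bin x)) =
        cs.filter (fun c => decide (bin c = bin x)) ++ [x] := by
      rw [List.filter_append]; simp [List.filter]
    -- membership facts about buckets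
    have hbucket : ∀ (j : Int) (y : α),
        y ∈ PySem.List.sorted (cs.filter (fun c => decide (bin c = j))) (fun c => row c) → bin y = j := by
      intro j y hy
      have := (PySem.List.mem_sorted _ _ _ _).mp hy
      have := (List.mem_filter.mp this).2
      exact of_decide_eq_true this
    have e1 : J1.map (fun j => PySem.List.sorted ((cs ++ [x]).filter (fun c => decide (bin c = j))) (fun c => row c))
        = J1.map (fun j => PySem.List.sorted (cs.filter (fun c => decide (bin c = j))) (fun c => row c)) :=
      List.map_congr_left (fun j hj => by rw [hFne j (by have := hJ1lt j hj; omega)])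
    have e2 : J2.map (fun j => PySem.List.sorted ((cs ++ [x]).filter (fun c => decide (bin c = j))) (fun c => row c))
        = J2.map (fun j => PySem.List.sorted (cs.filter (fun c => decide (bin c = j))) (fun c => row c)) :=
      List.map_congr_left (fun j hj => by rw [hFne j (by have := hJ2gt j hj; omega)])
    have e3 : PySem.List.sorted ((cs ++ [x]).filter (fun c => decide (bin c = bin x))) (fun c => row c)
        = PySem.List.insertBy (fun a b => decide (row a < row b)) x
            (PySem.List.sorted (cs.filter (fun c => decide (bin c = bin x))) (fun c => row c)) := by
      rw [hFx, pv_sorted_append_singleton]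
    simp only [List.map_append, List.map_cons, List.flatten_append, List.flatten_cons]
    rw [e1, e2, e3]
    have hA1 : ∀ y ∈ (J1.map (fun j => PySem.List.sorted (cs.filter (fun c => decide (bin c = j))) (fun c => row c))).flatten,
        pvLex bin row x y = false := by
      intro y hy
      obtain ⟨l, hl, hyl⟩ := List.mem_flatten.mp hy
      obtain ⟨j, hj, rfl⟩ := List.mem_map.mp hl
      have hby : bin y = j := hbucket j y hyl
      have hlt : bin y < bin x := by have := hJ1lt j hj; omega
      simp only [pvLex]
      simp only [decide_eq_false (show ¬ bin x < bin y by omega), decide_eq_true hlt]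
      simp
    have hA2 : ∀ z ∈ (J2.map (fun j => PySem.List.sorted (cs.filter (fun c => decide (bin c = j))) (fun c => row c))).flatten,
        pvLex bin row x z = true := by
      intro z hz
      obtain ⟨l, hl, hzl⟩ := List.mem_flatten.mp hz
      obtain ⟨j, hj, rfl⟩ := List.mem_map.mp hl
      have hbz : bin z = j := hbucket j z hzl
      have hlt : bin x < bin z := by have := hJ2gt j hj; omega
      simp only [pvLex]
      simp [decide_eq_true hlt]
    have hEq : ∀ y ∈ PySem.List.sorted (cs.filter (fun c => decide (bin c = bin x))) (fun c => row c),
        pvLex bin row x y = (fun a b => decide (row a < row b)) x y := by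
      intro y hy
      have hby : bin y = bin x := hbucket (bin x) y hy
      simp only [pvLex]
      simp only [decide_eq_false (show ¬ bin x < bin y by omega),
        decide_eq_false (show ¬ bin y < bin x by omega)]
      simp
    rw [pv_insertBy_append_false _ _ _ _ hA1,
      pv_insertBy_append_true _ _ _ _ hA2,
      pv_insertBy_congr (pvLex bin row) (fun a b => decide (row a < row b)) x _ hEq]

theorem pv_foldl_bins {α : Type} (bin : α → Int) :
    ∀ (cs : List α) (n : Nat), (∀ c ∈ cs, 0 ≤ bin c ∧ bin c < (n : Int)) →
    cs.foldl (fun bins c =>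
        match PySem.List.pyIdx? bins.length (bin c) with
        | some j => bins.set j (bins.getD j [] ++ [c])
        | none => bins) (List.replicate n ([] : List α))
      = (List.range n).map (fun (j : Nat) => cs.filter (fun c => decide (bin c = (j : Int)))) := by
  intro cs
  induction cs using List.reverseRecOn with
  | nil =>
    intro n _
    apply List.ext_getElem
    · simp
    · intro i h1 h2; simp
  | append_singleton cs x ih =>
    intro n hmem
    obtain ⟨hx0, hxn⟩ := hmem x (by simp)
    rw [List.foldl_append, ih _ (fun c hc => hmem c (by simp [hc]))]
    simp only [List.foldl_cons, List.foldl_nil, List.length_map, List.length_range]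
    have hidx : PySem.List.pyIdx? n (bin x) = some (bin x).toNat := by
      simp [PySem.List.pyIdx?, hx0, hxn]
    rw [hidx]
    simp only []
    have hj0n : (bin x).toNat < n := by omega
    have hcast : ((bin x).toNat : Int) = bin x := Int.toNat_of_nonneg hx0
    have hgetD : ((List.range n).map (fun (j : Nat) => cs.filter (fun c => decide (bin c = (j : Int))))).getD
        (bin x).toNat [] = cs.filter (fun c => decide (bin c = ((bin x).toNat : Int))) := by
      rw [List.getD_eq_getElem?_getD]
      simp [hj0n]
    rw [hgetD]
    apply List.ext_getElem
    · simp
    · intro i h1 h2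
      have hi : i < n := by simpa using h2
      rw [List.getElem_set]
      simp only [List.getElem_map, List.getElem_range]
      rw [List.filter_append]
      by_cases hij : (bin x).toNat = i
      · subst hij
        simp [List.filter, hcast]
      · have hne : ¬ (bin x = (i : Int)) := by omega
        simp [hij, List.filter, hne]

-- flatMapping over the bins ignores the empty ones, so A's filter of empty bins is invisible
theorem pv_filter_flatMap {α β : Type} (bs : List (List α)) (g : List α → List β)
    (hg : g [] = []) :
    (bs.filter (fun b => decide (0 < b.length))).flatMap g = bs.flatMap g := by
  induction bs with
  | nil => simp
  | cons b bs ih =>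
    by_cases hb : 0 < b.length
    · simp only [List.filter_cons, hb, decide_true, if_true, List.flatMap_cons, ih]
    · have : b = [] := by
        cases b with
        | nil => rfl
        | cons y ys => simp at hb
      subst this
      simp [hg, ih]

theorem pv_enumerate_map {α β : Type} (h : α → β) :
    ∀ (xs : List α) (s : Int),
      PySem.List.enumerate (xs.map h) s = (PySem.List.enumerate xs s).map (fun p => (p.1, h p.2)) := by
  intro xs
  induction xs with
  | nil => intro s; simp [PySem.List.enumerate_nil]
  | cons x xs ih => intro s; simp [PySem.List.enumerate_cons, ih]

theorem pv_len4 {row : List Int} (h : row.length = 4) : ∃ a b c d : Int, row = [a, b, c, d] := by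
  rcases row with _ | ⟨a, _ | ⟨b, _ | ⟨c, _ | ⟨d, _ | ⟨e, t⟩⟩⟩⟩⟩ <;> simp_all

theorem pv_centroids_cols (extremes : List (List Int)) (h4 : ∀ row ∈ extremes, row.length = 4) :
    (pvCentroids extremes).map (fun c => c.2.1) = extremes.map pvCol := by
  unfold pvCentroids
  rw [List.map_map]
  have hcong : ∀ p ∈ PySem.List.enumerate extremes 0,
      ((fun c : Int × Int × Int => c.2.1) ∘ (fun p : Int × List Int =>
        match p.2 with
        | [r0, r1, c0, c1] => (PySem.Int.floordiv (r0 + r1) 2, PySem.Int.floordiv (c0 + c1) 2, p.1)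
        | _ => ((0 : Int), (0 : Int), (0 : Int)))) p = pvCol p.2 := by
    intro p hp
    obtain ⟨k, hk, rfl⟩ := (PySem.List.mem_enumerate_iff extremes 0 p).mp hp
    obtain ⟨a, b, c, d, hrow⟩ := pv_len4 (h4 extremes[k] (List.getElem_mem hk))
    simp only [Function.comp, hrow, pvCol]
    simp [List.getD]
  rw [List.map_congr_left hcong]
  rw [show (fun p : Int × List Int => pvCol p.2) = pvCol ∘ (fun p : Int × List Int => p.2) from rfl,
    ← List.map_map, PySem.List.map_snd_enumerate]

-- ===== VERDICT (by name: the statement is the Claim_ definition above) =====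
theorem sort_by_grid_pos_spec : Claim_equal_sort_by_grid_pos := by
  intro extremes n_cols _hdom hpre
  unfold Spec_sort_by_grid_pos
  obtain ⟨hne, hnc, h4, hnn⟩ := hpre
  have hcols : (pvCentroids extremes).map (fun c => c.2.1) = extremes.map pvCol :=
    pv_centroids_cols extremes h4
  have hnonneg : ∀ row ∈ extremes, 0 ≤ pvCol row := hnn
  -- the maximum column
  obtain ⟨e, es, rfl⟩ : ∃ e es, extremes = e :: es := by
    cases extremes with
    | nil => exact absurd rfl hne
    | cons e es => exact ⟨e, es, rfl⟩
  have hmax : PySem.List.max? ((pvCentroids (e :: es)).map (fun c => c.2.1)) (fun x => x)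
      = some (pvMaxCol (e :: es)) := by
    rw [hcols]
    simp only [List.map_cons]
    rw [PySem.List.max?_id_cons]
    simp [pvMaxCol]
  set m := pvMaxCol (e :: es) with hmdef
  have hmmem : m ∈ (e :: es).map pvCol := by
    have := PySem.List.max?_mem hmax
    rwa [hcols] at this
  have hm0 : 0 ≤ m := by
    obtain ⟨row, hrow, hrm⟩ := List.mem_map.mp hmmem
    have := hnonneg row hrow; omega
  have hub : ∀ y ∈ (pvCentroids (e :: es)).map (fun c => c.2.1), y ≤ m :=
    fun y hy => PySem.List.max?_isMax hmax y hy
  set bs := PySem.Int.floordiv m n_cols + 1 with hbsdef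
  have hq0 : 0 ≤ PySem.Int.floordiv m n_cols := by
    rw [PySem.Int.floordiv_eq_ediv_of_pos (by omega)]
    exact Int.ediv_nonneg hm0 (by omega)
  have hbs : 0 < bs := by omega
  have hbound : ∀ c ∈ pvCentroids (e :: es),
      0 ≤ PySem.Int.floordiv c.2.1 bs ∧ PySem.Int.floordiv c.2.1 bs < ((n_cols.toNat : Nat) : Int) := by
    intro c hc
    have hcy : c.2.1 ∈ (pvCentroids (e :: es)).map (fun c => c.2.1) :=
      List.mem_map_of_mem hc
    have hyle : c.2.1 ≤ m := hub _ hcy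
    have hy0 : 0 ≤ c.2.1 := by
      rw [hcols] at hcy
      obtain ⟨row, hrow, hrm⟩ := List.mem_map.mp hcy
      have := hnonneg row hrow; omega
    have hcastn : ((n_cols.toNat : Nat) : Int) = n_cols := Int.toNat_of_nonneg (by omega)
    constructor
    · rw [PySem.Int.floordiv_eq_ediv_of_pos hbs]
      exact Int.ediv_nonneg hy0 (le_of_lt hbs)
    · have h1 : PySem.Int.floordiv c.2.1 bs ≤ PySem.Int.floordiv m bs := by
        rw [PySem.Int.floordiv_eq_ediv_of_pos hbs, PySem.Int.floordiv_eq_ediv_of_pos hbs]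
        exact Int.ediv_le_ediv hbs hyle
      have h2 : PySem.Int.floordiv m bs < n_cols := by
        rw [PySem.Int.floordiv_lt_iff_lt_mul hbs]
        have h3 := PySem.Int.floordiv_mul_add_mod m n_cols
        have h4' := PySem.Int.mod_lt (a := m) (b := n_cols) (by omega)
        have h5 := PySem.Int.mod_nonneg (a := m) (b := n_cols) (by omega)
        have h6 : n_cols * bs = PySem.Int.floordiv m n_cols * n_cols + n_cols := by
          rw [hbsdef]; ring
        omega
      omega
  -- reduce both ports
  simp only [sort_by_grid_pos, sort_by_grid_pos_alt, hmax]
  rw [pv_foldl_bins (fun c => PySem.Int.floordiv c.2.1 bs) (pvCentroids (e :: es)) n_cols.toNat hbound]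
  -- fold the A-side tail into the composite sort
  have hJpw : ((List.range n_cols.toNat).map (fun (j : Nat) => (j : Int))).Pairwise (· < ·) := by
    rw [List.pairwise_map]
    exact (List.pairwise_lt_range).imp (fun {a b} h => by exact_mod_cast h)
  have hJmem : ∀ c ∈ pvCentroids (e :: es),
      PySem.Int.floordiv c.2.1 bs ∈ (List.range n_cols.toNat).map (fun (j : Nat) => (j : Int)) := by
    intro c hc
    obtain ⟨h0, hn⟩ := hbound c hc
    refine List.mem_map.mpr ⟨(PySem.Int.floordiv c.2.1 bs).toNat, List.mem_range.mpr ?_,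
      Int.toNat_of_nonneg h0⟩
    omega
  have hmain := pv_flatten_buckets (fun c => PySem.Int.floordiv c.2.1 bs) (fun c => c.1)
    ((List.range n_cols.toNat).map (fun (j : Nat) => (j : Int))) hJpw (pvCentroids (e :: es)) hJmem
  rw [List.map_map] at hmain
  simp only [Function.comp_def] at hmain
  simp only [List.flatMap_map]
  rw [pv_filter_flatMap _ _ (by rfl)]
  simp only [List.flatMap_map]
  rw [List.flatMap_def]
  rw [show ((List.range n_cols.toNat).map (fun (j : Nat) =>
        (PySem.List.sorted ((pvCentroids (e :: es)).filter
          (fun c => decide (PySem.Int.floordiv c.2.1 bs = (j : Int)))) (fun c => c.1)).map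
            (fun c => c.2.2))).flatten
      = (((List.range n_cols.toNat).map (fun (j : Nat) =>
          PySem.List.sorted ((pvCentroids (e :: es)).filter
            (fun c => decide (PySem.Int.floordiv c.2.1 bs = (j : Int)))) (fun c => c.1))).flatten).map
              (fun c => c.2.2) from by rw [List.map_flatten, List.map_map]; rfl]
  rw [hmain, pv_enumerate_map, ← hbsdef]
  simp only [List.map_map]
  rfl
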